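-- pv_equiv track=rewrite | github.com/vipul253/nptel_py_pracs | pyweek4.py | onehop
-- ===== SOURCE A (Python) =====
-- def onehop(l):
--     er = []
--     temp = []
--     for (i, j) in l:
--         for (k, l1) in l:
--             if i != k and j != l1:
--                 if (i == l1 and j != k):
--                     if [k, j] not in er:
--                         er.append([k, j])
--     for i in range(len(er)):
--         tem1 = tuple(er[i])
--         temp.append(tem1)
--     ans = sorted(temp)
--     return ans
-- ===== SOURCE B (Python) =====
-- def onehop(l):
--     # Index outgoing edges by source node, then cross each edge (k, m) with
--     # the targets of m; dedup with a set and sort once at the end.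
--     outs = {}
--     for (a, b) in l:
--         outs.setdefault(a, []).append(b)
--     res = set()
--     for (k, m) in l:
--         if k != m:
--             for j in outs.get(m, []):
--                 if j != m and j != k:
--                     res.add((k, j))
--     return sorted(res)
-- ===== Notes on version B (the rewrite author's own statement) =====
-- stated objective: faster
-- what changed: Replaced the quadratic all-pairs edge scan with a membership-tested list by an adjacency index keyed on the intermediate node, crossing each edge with that node's outgoing targets and deduplicating via a set.
import Mathlib
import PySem

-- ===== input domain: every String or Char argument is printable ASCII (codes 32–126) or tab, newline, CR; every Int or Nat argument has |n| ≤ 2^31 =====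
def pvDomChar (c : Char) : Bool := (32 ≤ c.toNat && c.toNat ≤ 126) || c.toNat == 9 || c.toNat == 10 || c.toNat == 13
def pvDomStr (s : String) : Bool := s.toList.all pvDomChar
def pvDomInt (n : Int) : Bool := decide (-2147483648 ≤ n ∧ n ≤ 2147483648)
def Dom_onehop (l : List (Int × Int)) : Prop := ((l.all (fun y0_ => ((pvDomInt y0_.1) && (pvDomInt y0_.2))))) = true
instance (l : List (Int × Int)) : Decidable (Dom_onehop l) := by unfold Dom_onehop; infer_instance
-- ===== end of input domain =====

-- B replaces A's quadratic all-pairs scan (with a list membership test for dedup) by an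
-- adjacency index on the intermediate node plus a set; same sorted return value (faster).

-- ===== PORT A =====
-- for (i, j) in l: for (k, l1) in l: if i != k and j != l1: if i == l1 and j != k:
--   if [k, j] not in er: er.append([k, j])   (the pairs [k,j]/tuples are ported as Int × Int)
def onehopInner (ij : Int × Int) (er : List (Int × Int)) (kl : Int × Int) : List (Int × Int) :=
  if ij.1 ≠ kl.1 ∧ ij.2 ≠ kl.2 then
    if ij.1 = kl.2 ∧ ij.2 ≠ kl.1 then
      if (kl.1, ij.2) ∉ er then er ++ [(kl.1, ij.2)] else er
    else er
  else er

def onehop (l : List (Int × Int)) : List (Int × Int) :=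
  let er := l.foldl (fun er ij => l.foldl (onehopInner ij) er) []
  -- for i in range(len(er)): temp.append(tuple(er[i]))  — index loop over er, appending each
  -- element (tuple(er[i]) is the pair itself); ported as the element-wise append fold
  let temp := er.foldl (fun acc e => acc ++ [e]) []
  PySem.List.sorted2 temp Prod.fst Prod.snd

-- ===== PORT B =====
def onehop_alt (l : List (Int × Int)) : List (Int × Int) :=
  -- outs.setdefault(a, []).append(b)
  let outs : PySem.Dict Int (List Int) :=
    l.foldl (fun d ab => d.insert ab.1 (d.getD ab.1 [] ++ [ab.2])) PySem.Dict.empty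
  -- for (k, m) in l: if k != m: for j in outs.get(m, []): if j != m and j != k: res.add((k, j))
  let res : PySem.Set (Int × Int) :=
    l.foldl (fun res km =>
      if km.1 ≠ km.2 then
        (outs.getD km.2 []).foldl (fun res j =>
          if j ≠ km.2 ∧ j ≠ km.1 then PySem.Set.add res (km.1, j) else res) res
      else res) PySem.Set.empty
  PySem.List.sorted2 res Prod.fst Prod.snd

-- ===== PRECONDITION & SPEC =====
def Spec_onehop (l : List (Int × Int)) (out : List (Int × Int)) : Prop := out = onehop_alt l
instance (l : List (Int × Int)) (out : List (Int × Int)) : Decidable (Spec_onehop l out) := by unfold Spec_onehop; infer_instance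

-- ===== CLAIM (what is proved, stated in full; the proofs are below) =====
def Claim_equal_onehop : Prop := ∀ (l : List (Int × Int)), Dom_onehop l → Spec_onehop l (onehop l)

-- ===== LEMMAS AND PROOFS =====

-- generic accumulator lemma: a fold whose step adds (at most) elements described by R,
-- preserving Nodup, has membership 'old ∨ generated' and stays Nodup
theorem foldl_acc_mem {α β : Type} (step : List α → β → List α) (R : β → α → Prop)
    (hmem : ∀ acc x y, y ∈ step acc x ↔ y ∈ acc ∨ R x y)
    (hnodup : ∀ acc x, acc.Nodup → (step acc x).Nodup) :
    ∀ (l : List β) (acc : List α),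
      (∀ y, y ∈ l.foldl step acc ↔ y ∈ acc ∨ ∃ x ∈ l, R x y) ∧
      (acc.Nodup → (l.foldl step acc).Nodup) := by
  intro l
  induction l with
  | nil => intro acc; simp
  | cons x t ih =>
    intro acc
    constructor
    · intro y
      rw [List.foldl_cons, (ih (step acc x)).1 y, hmem]
      simp only [List.mem_cons]
      constructor
      · rintro ((h | h) | ⟨z, hz, hR⟩)
        · exact Or.inl h
        · exact Or.inr ⟨x, Or.inl rfl, h⟩
        · exact Or.inr ⟨z, Or.inr hz, hR⟩
      · rintro (h | ⟨z, (rfl | hz), hR⟩)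
        · exact Or.inl (Or.inl h)
        · exact Or.inl (Or.inr hR)
        · exact Or.inr ⟨z, hz, hR⟩
    · intro hnd
      exact (ih (step acc x)).2 (hnodup acc x hnd)

theorem onehopInner_mem (ij : Int × Int) (acc : List (Int × Int)) (kl : Int × Int)
    (y : Int × Int) :
    y ∈ onehopInner ij acc kl ↔
      y ∈ acc ∨ (ij.1 ≠ kl.1 ∧ ij.2 ≠ kl.2 ∧ ij.1 = kl.2 ∧ ij.2 ≠ kl.1 ∧ y = (kl.1, ij.2)) := by
  unfold onehopInner
  split_ifs <;> simp_all

theorem onehopInner_nodup (ij : Int × Int) (acc : List (Int × Int)) (kl : Int × Int)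
    (h : acc.Nodup) : (onehopInner ij acc kl).Nodup := by
  unfold onehopInner
  split_ifs with h1 h2 h3
  all_goals try exact h
  refine List.Nodup.append h (List.nodup_singleton _) ?_
  intro a ha hb
  rw [List.mem_singleton] at hb
  subst hb
  exact h3 ha

-- characterization of A's er accumulator
theorem er_spec (l : List (Int × Int)) :
    (∀ y, y ∈ l.foldl (fun er ij => l.foldl (onehopInner ij) er) [] ↔
      ∃ ij ∈ l, ∃ kl ∈ l, ij.1 ≠ kl.1 ∧ ij.2 ≠ kl.2 ∧ ij.1 = kl.2 ∧ ij.2 ≠ kl.1 ∧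
        y = (kl.1, ij.2)) ∧
    (l.foldl (fun er ij => l.foldl (onehopInner ij) er) []).Nodup := by
  have hstep := foldl_acc_mem (α := Int × Int) (β := Int × Int)
    (fun er ij => l.foldl (onehopInner ij) er)
    (fun ij y => ∃ kl ∈ l, ij.1 ≠ kl.1 ∧ ij.2 ≠ kl.2 ∧ ij.1 = kl.2 ∧ ij.2 ≠ kl.1 ∧
      y = (kl.1, ij.2))
    (fun acc ij y => by
      have := foldl_acc_mem (onehopInner ij)
        (fun kl y => ij.1 ≠ kl.1 ∧ ij.2 ≠ kl.2 ∧ ij.1 = kl.2 ∧ ij.2 ≠ kl.1 ∧ y = (kl.1, ij.2))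
        (fun acc kl y => onehopInner_mem ij acc kl y)
        (fun acc kl h => onehopInner_nodup ij acc kl h) l acc
      simpa using this.1 y)
    (fun acc ij h => by
      have := foldl_acc_mem (onehopInner ij)
        (fun kl y => ij.1 ≠ kl.1 ∧ ij.2 ≠ kl.2 ∧ ij.1 = kl.2 ∧ ij.2 ≠ kl.1 ∧ y = (kl.1, ij.2))
        (fun acc kl y => onehopInner_mem ij acc kl y)
        (fun acc kl h => onehopInner_nodup ij acc kl h) l acc
      exact this.2 h) l []
  refine ⟨fun y => by simpa using (hstep.1 y), hstep.2 (by simp)⟩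

theorem foldl_append_id {α : Type} (l acc : List α) :
    l.foldl (fun a e => a ++ [e]) acc = acc ++ l := by
  induction l generalizing acc with
  | nil => simp
  | cons x t ih => simp [ih]

-- the outs dict: b ∈ outs.getD a [] ↔ (a, b) ∈ l
theorem outs_spec (l : List (Int × Int)) :
    ∀ (d : PySem.Dict Int (List Int)) (a b : Int),
      b ∈ (l.foldl (fun d ab => d.insert ab.1 (d.getD ab.1 [] ++ [ab.2])) d).getD a [] ↔
        b ∈ d.getD a [] ∨ (a, b) ∈ l := by
  induction l with
  | nil => simp
  | cons x t ih =>
    intro d a b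
    obtain ⟨x1, x2⟩ := x
    rw [List.foldl_cons, ih, PySem.Dict.getD_insert]
    by_cases hax : a = x1
    · subst hax
      rw [if_pos rfl]
      simp only [List.mem_append, List.mem_cons, Prod.mk.injEq, true_and]
      tauto
    · simp only [if_neg hax, List.mem_cons, Prod.mk.injEq]
      constructor
      · tauto
      · rintro (h | ⟨rfl, rfl⟩ | h)
        · exact Or.inl h
        · exact absurd rfl hax
        · exact Or.inr h

theorem res_add_nodup (s : PySem.Set (Int × Int)) (x : Int × Int) (h : List.Nodup s) :
    List.Nodup (PySem.Set.add s x) := by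
  unfold PySem.Set.add
  split_ifs with hc
  · exact h
  · refine List.Nodup.append h (List.nodup_singleton _) ?_
    intro a ha hb
    rw [List.mem_singleton] at hb
    subst hb
    exact hc (by simp [PySem.Set.contains, ha])

-- characterization of B's res set
theorem res_spec (l : List (Int × Int)) (outs : PySem.Dict Int (List Int))
    (houts : ∀ a b, b ∈ outs.getD a [] ↔ (a, b) ∈ l) :
    (∀ y, y ∈ l.foldl (fun res km =>
        if km.1 ≠ km.2 then
          (outs.getD km.2 []).foldl (fun res j =>
            if j ≠ km.2 ∧ j ≠ km.1 then PySem.Set.add res (km.1, j) else res) res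
        else res) PySem.Set.empty ↔
      ∃ km ∈ l, km.1 ≠ km.2 ∧ ∃ j, (km.2, j) ∈ l ∧ j ≠ km.2 ∧ j ≠ km.1 ∧ y = (km.1, j)) ∧
    (l.foldl (fun res km =>
        if km.1 ≠ km.2 then
          (outs.getD km.2 []).foldl (fun res j =>
            if j ≠ km.2 ∧ j ≠ km.1 then PySem.Set.add res (km.1, j) else res) res
        else res) PySem.Set.empty).Nodup := by
  have hinner : ∀ (km : Int × Int) (acc : PySem.Set (Int × Int)),
      (∀ y, y ∈ (outs.getD km.2 []).foldl (fun res j =>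
          if j ≠ km.2 ∧ j ≠ km.1 then PySem.Set.add res (km.1, j) else res) acc ↔
        y ∈ acc ∨ ∃ j ∈ outs.getD km.2 [], (j ≠ km.2 ∧ j ≠ km.1) ∧ y = (km.1, j)) ∧
      (List.Nodup acc → List.Nodup ((outs.getD km.2 []).foldl (fun res j =>
          if j ≠ km.2 ∧ j ≠ km.1 then PySem.Set.add res (km.1, j) else res) acc)) := by
    intro km acc
    exact foldl_acc_mem _ (fun j y => (j ≠ km.2 ∧ j ≠ km.1) ∧ y = (km.1, j))
      (fun acc j y => by
        try dsimp only
        split_ifs with h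
        · rw [PySem.Set.mem_add]; tauto
        · tauto)
      (fun acc j h => by
        try dsimp only
        split_ifs with hc
        · exact res_add_nodup acc _ h
        · exact h) (outs.getD km.2 []) acc
  have hstep := foldl_acc_mem (α := Int × Int) (β := Int × Int)
    (fun res km =>
      if km.1 ≠ km.2 then
        (outs.getD km.2 []).foldl (fun res j =>
          if j ≠ km.2 ∧ j ≠ km.1 then PySem.Set.add res (km.1, j) else res) res
      else res)
    (fun km y => km.1 ≠ km.2 ∧ ∃ j, (km.2, j) ∈ l ∧ j ≠ km.2 ∧ j ≠ km.1 ∧ y = (km.1, j))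
    (fun acc km y => by
      try dsimp only
      split_ifs with h
      · rw [(hinner km acc).1 y]
        simp only [houts]  -- rewrite j ∈ outs.getD km.2 [] into (km.2, j) ∈ l
        constructor
        · rintro (hy | ⟨j, hj, ⟨hj1, hj2⟩, rfl⟩)
          · exact Or.inl hy
          · exact Or.inr ⟨h, j, hj, hj1, hj2, rfl⟩
        · rintro (hy | ⟨_, j, hj, hj1, hj2, rfl⟩)
          · exact Or.inl hy
          · exact Or.inr ⟨j, hj, ⟨hj1, hj2⟩, rfl⟩
      · tauto)
    (fun acc km h => by
      try dsimp only
      split_ifs with hc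
      · exact (hinner km acc).2 h
      · exact h) l PySem.Set.empty
  exact ⟨fun y => by simpa using hstep.1 y, hstep.2 (by simp [PySem.Set.empty])⟩

-- sorted2 with the two component keys is sorted with the lexicographic key
theorem sorted2_eq_sorted_lex (xs : List (Int × Int)) :
    PySem.List.sorted2 xs Prod.fst Prod.snd =
      PySem.List.sorted xs (fun p => toLex (p.1, p.2)) := by
  have hcmp : (fun a b : Int × Int =>
        decide (a.1 < b.1) || (!decide (b.1 < a.1) && decide (a.2 < b.2)))
      = (fun a b : Int × Int =>
        decide ((toLex (a.1, a.2) : Lex (Int × Int)) < toLex (b.1, b.2))) := by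
    funext a b
    rcases lt_trichotomy a.1 b.1 with h | h | h
    · simp [Prod.Lex.lt_iff, h, asymm h]
    · simp [Prod.Lex.lt_iff, h]
    · simp [Prod.Lex.lt_iff, h, asymm h, h.ne']
  unfold PySem.List.sorted2 PySem.List.sorted
  dsimp only
  rw [hcmp]
  rfl

theorem lex_key_injective : Function.Injective (fun p : Int × Int => toLex (p.1, p.2)) := by
  intro a b h
  have := toLex.injective h
  simpa using this

-- ===== VERDICT (by name: the statement is the Claim_ definition above) =====
theorem onehop_spec : Claim_equal_onehop := by
  intro l _
  unfold Spec_onehop onehop onehop_alt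
  simp only [foldl_append_id, List.nil_append]
  have hA := er_spec l
  have hempty : ∀ a : Int, (PySem.Dict.empty : PySem.Dict Int (List Int)).getD a [] = [] :=
    fun _ => rfl
  have hB := res_spec l _ (fun a b => by
    have := outs_spec l PySem.Dict.empty a b
    rw [hempty] at this
    simpa using this)
  rw [sorted2_eq_sorted_lex, sorted2_eq_sorted_lex]
  apply PySem.List.sorted_eq_sorted_of_perm _ _ _ lex_key_injective
  rw [List.perm_ext_iff_of_nodup hA.2 hB.2]
  intro y
  rw [hA.1 y, hB.1 y]
  constructor
  · rintro ⟨ij, hij, kl, hkl, h1, h2, h3, h4, rfl⟩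
    exact ⟨kl, hkl, fun h => h1 (h3.trans h.symm), ij.2,
      by rw [← h3]; simpa using hij, h2, h4, rfl⟩
  · rintro ⟨km, hkm, h1, j, hj, h2, h3, rfl⟩
    exact ⟨(km.2, j), hj, km, hkm, Ne.symm h1, h2, rfl, h3, rfl⟩
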